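-- pv_equiv track=rewrite | github.com/naoya25/sudoku | v2.py | check_i
-- ===== SOURCE A (Python) =====
-- def check_i(s, i):
--     # 横
--     r = i // 9
--     ss = s[r * 9 : (r + 1) * 9]
--     for j in range(1, 10):
--         if ss.count(str(j)) > 1:
--             return False
--     # 縦
--     ss = [s[i % 9 + 9 * j] for j in range(9)]
--     for j in range(1, 10):
--         if ss.count(str(j)) > 1:
--             return False
--     # 3 x 3
--     ss = [s[i // 27 * 27 + i % 9 // 3 * 3 + j // 3 * 9 + j % 3] for j in range(9)]
--     for j in range(1, 10):
--         if ss.count(str(j)) > 1: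
--             return False
--     return True
-- ===== SOURCE B (Python) =====
-- def check_i(s, i):
--     def dup(cells):
--         seen = set()
--         for c in cells:
--             if '1' <= c <= '9':
--                 if c in seen:
--                     return True
--                 seen.add(c)
--         return False
--
--     r = i // 9
--     if dup(s[r * 9:(r + 1) * 9]):
--         return False
--     if dup([s[i % 9 + 9 * j] for j in range(9)]):
--         return False
--     if dup([s[i // 27 * 27 + i % 9 // 3 * 3 + j // 3 * 9 + j % 3] for j in range(9)]):
--         return False
--     return True
-- ===== Notes on version B (the rewrite author's own statement) =====
-- stated objective: simpler
-- what changed: Each region (row, column, 3x3 box) is checked by one single pass that keeps a `seen` set of digit cells and reports on the first repeat, instead of A's nine separate per-digit .count scans over every region.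
import Mathlib
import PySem

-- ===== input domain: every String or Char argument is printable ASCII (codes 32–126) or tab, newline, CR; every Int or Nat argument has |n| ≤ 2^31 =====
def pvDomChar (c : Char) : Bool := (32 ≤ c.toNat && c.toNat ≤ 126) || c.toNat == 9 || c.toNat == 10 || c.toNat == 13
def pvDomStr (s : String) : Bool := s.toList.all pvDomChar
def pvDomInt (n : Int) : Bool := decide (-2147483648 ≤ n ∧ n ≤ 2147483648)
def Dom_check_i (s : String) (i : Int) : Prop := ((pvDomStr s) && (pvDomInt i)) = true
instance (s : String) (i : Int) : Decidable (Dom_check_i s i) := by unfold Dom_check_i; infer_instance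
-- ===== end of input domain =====

-- B replaces A's nine per-digit .count scans over each region by a single pass per region with a `seen` set (objective: simpler).

-- ===== PORT A =====
-- literal transliteration of A: each 'for j in range(1,10): if ss.count(str(j)) > 1: return False'
-- becomes .any over pyRange 1 10 (early return False = any); the column/box comprehensions hold
-- 1-char strings, rendered as [c] and counted against str(j) = PySem.Int.toChars j.
def check_i (s : String) (i : Int) : Bool :=
  if (PySem.List.pyRange 1 10 1).any (fun j =>
      decide (1 < PySem.Chars.count
        (PySem.List.slice s.toList (some (PySem.Int.floordiv i 9 * 9)) (some ((PySem.Int.floordiv i 9 + 1) * 9)))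
        (PySem.Int.toChars j))) then false
  else if (PySem.List.pyRange 1 10 1).any (fun j =>
      decide (1 < PySem.List.count
        (((PySem.List.pyRange 0 9 1).map (fun k => PySem.List.pyGetD s.toList (PySem.Int.mod i 9 + 9 * k) ' ')).map (fun c => [c]))
        (PySem.Int.toChars j))) then false
  else if (PySem.List.pyRange 1 10 1).any (fun j =>
      decide (1 < PySem.List.count
        (((PySem.List.pyRange 0 9 1).map (fun k => PySem.List.pyGetD s.toList
            (PySem.Int.floordiv i 27 * 27 + PySem.Int.floordiv (PySem.Int.mod i 9) 3 * 3 +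
             PySem.Int.floordiv k 3 * 9 + PySem.Int.mod k 3) ' ')).map (fun c => [c]))
        (PySem.Int.toChars j))) then false
  else true

-- ===== PORT B =====
def pvIsDig (c : Char) : Bool := decide ('1' ≤ c) && decide (c ≤ '9')

-- B's inner helper `dup`: one pass over the region keeping a `seen` set
def pvDup : List Char → PySem.Set Char → Bool
  | [], _ => false
  | c :: rest, seen =>
    if pvIsDig c then
      if PySem.Set.contains seen c then true
      else pvDup rest (PySem.Set.add seen c)
    else pvDup rest seen

def check_i_alt (s : String) (i : Int) : Bool :=
  if pvDup
      (PySem.List.slice s.toList (some (PySem.Int.floordiv i 9 * 9)) (some ((PySem.Int.floordiv i 9 + 1) * 9)))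
      PySem.Set.empty then false
  else if pvDup
      ((PySem.List.pyRange 0 9 1).map (fun k => PySem.List.pyGetD s.toList (PySem.Int.mod i 9 + 9 * k) ' '))
      PySem.Set.empty then false
  else if pvDup
      ((PySem.List.pyRange 0 9 1).map (fun k => PySem.List.pyGetD s.toList
          (PySem.Int.floordiv i 27 * 27 + PySem.Int.floordiv (PySem.Int.mod i 9) 3 * 3 +
           PySem.Int.floordiv k 3 * 9 + PySem.Int.mod k 3) ' '))
      PySem.Set.empty then false
  else true

-- ===== PRECONDITION & SPEC =====
-- a region (list of cells) already contains some digit twice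
def pvRegionDup (l : List Char) : Bool :=
  l.any (fun c => decide ('1' ≤ c) && decide (c ≤ '9') && decide (1 < l.count c))

def pvBoxBase (i : Int) : Int :=
  PySem.Int.floordiv i 27 * 27 + PySem.Int.floordiv (PySem.Int.mod i 9) 3 * 3

-- Pre_ excludes exactly the inputs on which A raises IndexError: A returns normally iff the row
-- slice already holds a duplicate digit (it returns False before any indexing), or all nine column
-- indices are inside the string and either the column holds a duplicate digit or all nine box
-- indices are inside the string as well.
def Pre_check_i (s : String) (i : Int) : Prop :=
  pvRegionDup (PySem.List.slice s.toList (some (PySem.Int.floordiv i 9 * 9)) (some ((PySem.Int.floordiv i 9 + 1) * 9))) = true ∨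
  (PySem.Int.mod i 9 + 72 < PySem.Str.len s ∧
    (pvRegionDup ((PySem.List.pyRange 0 9 1).map (fun k => PySem.List.pyGetD s.toList (PySem.Int.mod i 9 + 9 * k) ' ')) = true ∨
     (-(PySem.Str.len s) ≤ pvBoxBase i ∧ pvBoxBase i + 20 < PySem.Str.len s)))
instance (s : String) (i : Int) : Decidable (Pre_check_i s i) := by unfold Pre_check_i; infer_instance

def pvWitness_check_i : String × Int :=
  ("123456789456789123789123456214365897365897214897214365531642978642978531978531642", 0)

def Spec_check_i (s : String) (i : Int) (out : Bool) : Prop := out = check_i_alt s i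
instance (s : String) (i : Int) (out : Bool) : Decidable (Spec_check_i s i out) := by unfold Spec_check_i; infer_instance

-- ===== CLAIM (what is proved, stated in full; the proofs are below) =====
def Claim_equal_check_i : Prop := ∀ (s : String) (i : Int), Dom_check_i s i → Pre_check_i s i → Spec_check_i s i (check_i s i)

-- ===== LEMMAS AND PROOFS =====

-- substring count of a single-character needle is element count
lemma chars_count_go_single (c : Char) :
    ∀ (l : List Char) (fuel acc : Nat), l.length ≤ fuel →
      PySem.Chars.count.go [c] fuel l acc = acc + l.count c := by
  intro l
  induction l with
  | nil => intro fuel acc _; cases fuel <;> simp [PySem.Chars.count.go]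
  | cons d t ih =>
    intro fuel acc hf
    cases fuel with
    | zero => simp at hf
    | succ f =>
      rw [PySem.Chars.count.go]
      by_cases hdc : c = d
      · subst hdc
        have hpre : [c].isPrefixOf (c :: t) = true := by simp [List.isPrefixOf]
        rw [if_pos hpre]
        simp only [List.length_singleton, List.drop_one, List.tail_cons]
        rw [ih f (acc + 1) (by simpa using hf), List.count_cons_self]
        omega
      · have hpre : ¬ ([c].isPrefixOf (d :: t) = true) := by
          simp [List.isPrefixOf]
          exact fun h => absurd h hdc
        rw [if_neg hpre, ih f acc (by simpa using Nat.le_of_succ_le_succ hf)]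
        simp only [List.count_cons]
        have : ¬ ((d == c) = true) := by simp; exact fun h => hdc h.symm
        rw [if_neg this]
        omega

lemma chars_count_single (l : List Char) (c : Char) :
    PySem.Chars.count l [c] = l.count c := by
  rw [PySem.Chars.count]
  simp only [List.isEmpty_cons, Bool.false_eq_true, if_false]
  simpa using chars_count_go_single c l l.length 0 le_rfl

-- characterisation of B's single-pass scan
lemma pvDup_iff (l : List Char) (seen : PySem.Set Char) :
    pvDup l seen = true ↔
      ∃ c, pvIsDig c = true ∧ ((c ∈ seen ∧ c ∈ l) ∨ 2 ≤ l.count c) := by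
  induction l generalizing seen with
  | nil => simp [pvDup]
  | cons d t ih =>
    by_cases hd : pvIsDig d = true
    · by_cases hs : d ∈ seen
      · have hc : PySem.Set.contains seen d = true := by
          simpa [PySem.Set.contains, List.contains_iff_mem] using hs
        simp only [pvDup, hd, if_pos, hc]
        constructor
        · intro _; exact ⟨d, hd, Or.inl ⟨hs, List.mem_cons_self⟩⟩
        · intro _; trivial
      · have hc : ¬ (PySem.Set.contains seen d = true) := by
          simpa [PySem.Set.contains, List.contains_iff_mem] using hs
        simp only [pvDup, hd, if_pos, if_neg hc, ih]
        constructor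
        · rintro ⟨c, hcd, h⟩
          rcases h with ⟨hmem, hin⟩ | hcount
          · rcases (PySem.Set.mem_add seen d c).mp hmem with h1 | h1
            · exact ⟨c, hcd, Or.inl ⟨h1, List.mem_cons_of_mem _ hin⟩⟩
            · subst h1
              refine ⟨c, hcd, Or.inr ?_⟩
              have h1 : 1 ≤ t.count c := List.one_le_count_iff.mpr hin
              rw [List.count_cons_self]
              omega
          · refine ⟨c, hcd, Or.inr ?_⟩
            have := List.count_le_count_cons (a := c) (b := d) (l := t)
            omega
        · rintro ⟨c, hcd, h⟩
          rcases h with ⟨hmem, hin⟩ | hcount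
          · have hne : c ≠ d := fun h => by subst h; exact hs hmem
            refine ⟨c, hcd, Or.inl ⟨(PySem.Set.mem_add seen d c).mpr (Or.inl hmem), ?_⟩⟩
            rcases List.mem_cons.mp hin with h | h
            · exact absurd h hne
            · exact h
          · by_cases hcdd : c = d
            · subst hcdd
              have h1 : 1 ≤ t.count c := by
                rw [List.count_cons_self] at hcount; omega
              exact ⟨c, hcd, Or.inl ⟨(PySem.Set.mem_add seen c c).mpr (Or.inr rfl),
                List.one_le_count_iff.mp h1⟩⟩
            · refine ⟨c, hcd, Or.inr ?_⟩
              have hne : ¬ ((d == c) = true) := by simp; exact fun h => hcdd h.symm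
              rw [List.count_cons, if_neg hne] at hcount
              omega
    · simp only [pvDup, hd, Bool.false_eq_true, if_false, ih]
      constructor
      · rintro ⟨c, hcd, h⟩
        rcases h with ⟨h1, h2⟩ | h1
        · exact ⟨c, hcd, Or.inl ⟨h1, List.mem_cons_of_mem _ h2⟩⟩
        · refine ⟨c, hcd, Or.inr ?_⟩
          have := List.count_le_count_cons (a := c) (b := d) (l := t)
          omega
      · rintro ⟨c, hcd, h⟩
        have hne : c ≠ d := fun h => by subst h; exact hd hcd
        rcases h with ⟨h1, h2⟩ | h1
        · refine ⟨c, hcd, Or.inl ⟨h1, ?_⟩⟩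
          rcases List.mem_cons.mp h2 with h | h
          · exact absurd h hne
          · exact h
        · refine ⟨c, hcd, Or.inr ?_⟩
          have hne' : ¬ ((d == c) = true) := by simp; exact fun h => hne h.symm
          rw [List.count_cons, if_neg hne'] at h1
          omega

lemma pvDup_empty_iff (l : List Char) :
    pvDup l PySem.Set.empty = true ↔ ∃ c, pvIsDig c = true ∧ 2 ≤ l.count c := by
  rw [pvDup_iff]
  constructor
  · rintro ⟨c, hc, h⟩
    rcases h with ⟨h1, _⟩ | h1
    · simp [PySem.Set.empty] at h1
    · exact ⟨c, hc, h1⟩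
  · rintro ⟨c, hc, h⟩; exact ⟨c, hc, Or.inr h⟩

lemma isdig_cases (c : Char) (h : pvIsDig c = true) :
    c = '1' ∨ c = '2' ∨ c = '3' ∨ c = '4' ∨ c = '5' ∨ c = '6' ∨ c = '7' ∨ c = '8' ∨ c = '9' := by
  simp only [pvIsDig, Bool.and_eq_true, decide_eq_true_eq] at h
  obtain ⟨h1, h2⟩ := h
  have hl : 49 ≤ c.toNat := h1
  have hr : c.toNat ≤ 57 := h2
  have hofnat := Char.ofNat_toNat c
  have hcases : c.toNat = 49 ∨ c.toNat = 50 ∨ c.toNat = 51 ∨ c.toNat = 52 ∨ c.toNat = 53 ∨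
      c.toNat = 54 ∨ c.toNat = 55 ∨ c.toNat = 56 ∨ c.toNat = 57 := by omega
  rcases hcases with h | h | h | h | h | h | h | h | h <;> rw [h] at hofnat <;>
    simp_all [← hofnat]

-- shared bridge: the nine-digit disjunction vs the existential over digit characters
lemma digits_exists_iff (g : Char → Nat) :
    ((1 < g '1' ∨ 1 < g '2' ∨ 1 < g '3' ∨ 1 < g '4' ∨ 1 < g '5' ∨
      1 < g '6' ∨ 1 < g '7' ∨ 1 < g '8' ∨ 1 < g '9')) ↔
    (∃ c, pvIsDig c = true ∧ 2 ≤ g c) := by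
  constructor
  · rintro (h | h | h | h | h | h | h | h | h)
    · exact ⟨'1', by decide, h⟩
    · exact ⟨'2', by decide, h⟩
    · exact ⟨'3', by decide, h⟩
    · exact ⟨'4', by decide, h⟩
    · exact ⟨'5', by decide, h⟩
    · exact ⟨'6', by decide, h⟩
    · exact ⟨'7', by decide, h⟩
    · exact ⟨'8', by decide, h⟩
    · exact ⟨'9', by decide, h⟩
  · rintro ⟨c, hc, h⟩
    rcases isdig_cases c hc with h1 | h1 | h1 | h1 | h1 | h1 | h1 | h1 | h1 <;> subst h1 <;>
      tauto

lemma rowAny (l : List Char) :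
    ((PySem.List.pyRange 1 10 1).any (fun j =>
      decide (1 < PySem.Chars.count l (PySem.Int.toChars j)))) = pvDup l PySem.Set.empty := by
  rw [Bool.eq_iff_iff, pvDup_empty_iff]
  have hr : PySem.List.pyRange 1 10 1 = [1, 2, 3, 4, 5, 6, 7, 8, 9] := by decide
  rw [hr]
  simp only [List.any_cons, List.any_nil, Bool.or_eq_true, decide_eq_true_eq, Bool.or_false,
    show PySem.Int.toChars (1 : Int) = ['1'] from by decide,
    show PySem.Int.toChars (2 : Int) = ['2'] from by decide,
    show PySem.Int.toChars (3 : Int) = ['3'] from by decide,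
    show PySem.Int.toChars (4 : Int) = ['4'] from by decide,
    show PySem.Int.toChars (5 : Int) = ['5'] from by decide,
    show PySem.Int.toChars (6 : Int) = ['6'] from by decide,
    show PySem.Int.toChars (7 : Int) = ['7'] from by decide,
    show PySem.Int.toChars (8 : Int) = ['8'] from by decide,
    show PySem.Int.toChars (9 : Int) = ['9'] from by decide,
    chars_count_single]
  exact digits_exists_iff (fun c => l.count c)

lemma colAny (l : List Char) :
    ((PySem.List.pyRange 1 10 1).any (fun j =>
      decide (1 < PySem.List.count (l.map (fun c => [c])) (PySem.Int.toChars j)))) =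
      pvDup l PySem.Set.empty := by
  rw [Bool.eq_iff_iff, pvDup_empty_iff]
  have hr : PySem.List.pyRange 1 10 1 = [1, 2, 3, 4, 5, 6, 7, 8, 9] := by decide
  have hinj : Function.Injective (fun c : Char => [c]) := by
    intro a b h; simpa using h
  rw [hr]
  simp only [List.any_cons, List.any_nil, Bool.or_eq_true, decide_eq_true_eq, Bool.or_false,
    PySem.List.count_eq,
    show PySem.Int.toChars (1 : Int) = ['1'] from by decide,
    show PySem.Int.toChars (2 : Int) = ['2'] from by decide,
    show PySem.Int.toChars (3 : Int) = ['3'] from by decide,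
    show PySem.Int.toChars (4 : Int) = ['4'] from by decide,
    show PySem.Int.toChars (5 : Int) = ['5'] from by decide,
    show PySem.Int.toChars (6 : Int) = ['6'] from by decide,
    show PySem.Int.toChars (7 : Int) = ['7'] from by decide,
    show PySem.Int.toChars (8 : Int) = ['8'] from by decide,
    show PySem.Int.toChars (9 : Int) = ['9'] from by decide]
  rw [show (['1'] : List Char) = (fun c : Char => [c]) '1' from rfl,
    show (['2'] : List Char) = (fun c : Char => [c]) '2' from rfl,
    show (['3'] : List Char) = (fun c : Char => [c]) '3' from rfl,
    show (['4'] : List Char) = (fun c : Char => [c]) '4' from rfl,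
    show (['5'] : List Char) = (fun c : Char => [c]) '5' from rfl,
    show (['6'] : List Char) = (fun c : Char => [c]) '6' from rfl,
    show (['7'] : List Char) = (fun c : Char => [c]) '7' from rfl,
    show (['8'] : List Char) = (fun c : Char => [c]) '8' from rfl,
    show (['9'] : List Char) = (fun c : Char => [c]) '9' from rfl]
  simp only [List.count_map_of_injective _ _ hinj]
  exact digits_exists_iff (fun c => l.count c)

-- ===== VERDICT (by name: the statement is the Claim_ definition above) =====
theorem check_i_spec : Claim_equal_check_i := by
  intro s i _ _
  unfold Spec_check_i check_i check_i_alt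
  rw [rowAny, colAny, colAny]
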